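-- pv_equiv track=rewrite | github.com/sungyujeon/problem-solving | others/line/2021-2/2.py | setArray
-- ===== SOURCE A (Python) =====
-- def setArray(array):
--     n = len(array)
--     researchDict = {}
--
--     for i in range(n):
--         words = array[i]
--         for word in words:
--             w = researchDict.get(word)
--             if w == None:
--                 researchDict[word] = [0 for _ in range(n)]
--                 researchDict[word][i] += 1
--             else:
--                 researchDict[word][i] += 1
--
--     return researchDict
-- ===== SOURCE B (Python) =====
-- def setArray(array):
--     keys = dict.fromkeys(w for row in array for w in row)
--     counts = []
--     for row in array:
--         c = {}
--         for w in row: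
--             c[w] = c.get(w, 0) + 1
--         counts.append(c)
--     return {w: [c.get(w, 0) for c in counts] for w in keys}
-- ===== Notes on version B (the rewrite author's own statement) =====
-- stated objective: alternative
-- what changed: B replaces A's occurrence-major pass (incrementing one slot of a per-word zero vector for every word occurrence, mutating dict values in place) by a word-major assembly: it dedups the flattened words once, builds one frequency dict per row, and then constructs each word's whole count vector directly by looking the word up in every row table.
import Mathlib
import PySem

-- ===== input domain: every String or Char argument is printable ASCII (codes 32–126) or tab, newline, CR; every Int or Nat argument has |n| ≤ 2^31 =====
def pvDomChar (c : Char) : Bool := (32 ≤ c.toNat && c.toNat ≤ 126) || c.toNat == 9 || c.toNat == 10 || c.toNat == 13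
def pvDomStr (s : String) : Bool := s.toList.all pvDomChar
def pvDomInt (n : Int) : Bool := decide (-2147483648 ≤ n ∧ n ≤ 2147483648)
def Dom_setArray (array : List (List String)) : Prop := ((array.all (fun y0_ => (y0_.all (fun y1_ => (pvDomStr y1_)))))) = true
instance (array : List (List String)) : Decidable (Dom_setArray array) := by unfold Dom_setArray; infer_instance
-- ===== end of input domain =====

-- B assembles each word's whole count vector from per-row frequency dicts instead of
-- incrementing one slot of a mutable vector per word occurrence; objective: alternative.

-- ===== PORT A =====
-- dict → PySem.Dict built by the double loop, returned as its items (assoc list).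
-- array[i] with i from range(len(array)) is always in range, so the total pyGetD form is exact;
-- researchDict[word][i] += 1 is Dict.modify with the in-place list set (pySetD, index in range).
def setArray (array : List (List String)) : List (String × List Int) :=
  let n : Int := array.length
  let d : PySem.Dict String (List Int) :=
    (PySem.List.pyRange 0 n 1).foldl (fun d i =>
      let words := PySem.List.pyGetD array i []
      words.foldl (fun d word =>
        match d.get? word with
        | none =>
            (d.insert word ((PySem.List.pyRange 0 n 1).map (fun _ => (0 : Int)))).modify word []
              (fun l => PySem.List.pySetD l i (PySem.List.pyGetD l i 0 + 1))
        | some _ =>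
            d.modify word []
              (fun l => PySem.List.pySetD l i (PySem.List.pyGetD l i 0 + 1))) d)
      PySem.Dict.empty
  d.items

-- ===== PORT B =====
-- dict.fromkeys over the flattened generator = ordered dedup (PySem.List.dedup);
-- each per-row frequency dict is the c[w] = c.get(w, 0) + 1 loop; the final dict comprehension
-- reads each word's count out of every row table with c.get(w, 0).
def setArray_alt (array : List (List String)) : List (String × List Int) :=
  let keys := PySem.List.dedup (array.flatMap (fun row => row))
  let counts := array.map (fun row =>
    row.foldl (fun c w => c.insert w (c.getD w 0 + 1)) (PySem.Dict.empty : PySem.Dict String Int))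
  keys.map (fun w => (w, counts.map (fun c => c.getD w 0)))

-- ===== PRECONDITION & SPEC =====
def Spec_setArray (array : List (List String)) (out : List (String × List Int)) : Prop := out = setArray_alt array
instance (array : List (List String)) (out : List (String × List Int)) : Decidable (Spec_setArray array out) := by unfold Spec_setArray; infer_instance

-- ===== CLAIM (what is proved, stated in full; the proofs are below) =====
def Claim_equal_setArray : Prop := ∀ (array : List (List String)), Dom_setArray array → Spec_setArray array (setArray array)

-- ===== LEMMAS AND PROOFS =====

-- the value vector A's dict holds for word w after processing the (row index, word) pairs L
def pvVec (n : Nat) (L : List (Nat × String)) (w : String) : List Int :=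
  (List.range n).map (fun j => (L.count (j, w) : Int))

-- A's inner-loop body, on one (row index, word) pair, after index normalisation
def pvStep (n : Nat) (d : PySem.Dict String (List Int)) (p : Nat × String) : PySem.Dict String (List Int) :=
  match d.get? p.2 with
  | none =>
      (d.insert p.2 ((List.range n).map (fun _ => (0 : Int)))).modify p.2 []
        (fun l => l.set p.1 (l.getD p.1 0 + 1))
  | some _ =>
      d.modify p.2 [] (fun l => l.set p.1 (l.getD p.1 0 + 1))

-- the (row index, word) pairs A's double loop visits, in order
def pvL (array : List (List String)) (n : Nat) : List (Nat × String) :=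
  (List.range n).flatMap (fun k => (array.getD k []).map (fun w => (k, w)))

lemma pv_bridge (array : List (List String)) :
    setArray array
      = ((pvL array array.length).foldl (pvStep array.length) PySem.Dict.empty).items := by
  unfold setArray pvL
  dsimp only
  rw [List.foldl_flatMap, PySem.List.pyRange_zero_nat, List.foldl_map]
  congr 1
  congr 1
  funext d k
  rw [List.foldl_map, PySem.List.pyGetD_natCast]
  congr 1
  funext d w
  unfold pvStep
  cases d.get? w <;> simp [List.map_map, Function.comp_def]

lemma pv_getD_range {α : Type} (l : List α) (d : α) :
    (List.range l.length).map (fun k => l.getD k d) = l := by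
  apply List.ext_getElem (by simp)
  intro j h1 h2
  simp [List.getD, List.getElem?_eq_getElem h2]

lemma pvL_fst_lt (array : List (List String)) (n : Nat) :
    ∀ p ∈ pvL array n, p.1 < n := by
  intro p hp
  simp only [pvL, List.mem_flatMap, List.mem_range, List.mem_map] at hp
  obtain ⟨k, hk, w, _, rfl⟩ := hp
  exact hk

lemma pvL_count (array : List (List String)) (n j : Nat) (w : String) (hj : j < n) :
    (pvL array n).count (j, w) = (array.getD j []).count w := by
  induction n with
  | zero => omega
  | succ n ih =>
    rw [pvL, List.range_succ, List.flatMap_append] at *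
    rw [List.count_append]
    simp only [List.flatMap_singleton]
    rcases Nat.lt_or_ge j n with h | h
    · rw [ih h]
      have h2 : ((array.getD n []).map (fun w => (n, w))).count (j, w) = 0 := by
        rw [List.count_eq_zero]
        intro hmem
        simp only [List.mem_map] at hmem
        obtain ⟨_, _, he⟩ := hmem
        injection he with he1 he2
        omega
      rw [h2]
      omega
    · have hj' : j = n := by omega
      subst hj'
      have h0 : (pvL array j).count (j, w) = 0 := by
        rw [List.count_eq_zero]
        intro hmem
        exact absurd (pvL_fst_lt array j _ hmem) (by simp)
      rw [show (List.range j).flatMap (fun k => (array.getD k []).map (fun w => (k, w))) = pvL array j from rfl, h0]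
      have hinj : Function.Injective (fun w : String => (j, w)) := by
        intro a b h; simpa using h
      simpa using List.count_map_of_injective (array.getD j []) _ hinj w

lemma pv_snd (array : List (List String)) :
    (pvL array array.length).map Prod.snd = array.flatten := by
  rw [pvL, List.map_flatMap]
  have h : (fun k => ((array.getD k [] : List String).map (fun w => (k, w))).map Prod.snd)
      = (fun k => (array.getD k [] : List String)) := by
    funext k; simp
  rw [h, List.flatMap_def, pv_getD_range]

lemma pv_vec_full (array : List (List String)) (w : String) :
    pvVec array.length (pvL array array.length) w
      = array.map (fun row => (row.count w : Int)) := by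
  apply List.ext_getElem (by simp [pvVec])
  intro j h1 h2
  simp only [pvVec, List.getElem_map, List.getElem_range]
  rw [pvL_count array array.length j w (by simpa using h2)]
  rw [List.getD_eq_getElem array [] (by simpa using h2)]

lemma pvVec_append_ne (n : Nat) (L : List (Nat × String)) (i : Nat) (w w' : String)
    (h : w' ≠ w) : pvVec n (L ++ [(i, w)]) w' = pvVec n L w' := by
  unfold pvVec
  apply List.map_congr_left
  intro j _
  have h0 : (j, w') ∉ [(i, w)] := by
    simp only [List.mem_singleton, Prod.ext_iff, not_and]
    intro _ h'
    exact h h'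
  rw [List.count_append, List.count_eq_zero.mpr h0]
  simp

lemma pvVec_append_self (n : Nat) (L : List (Nat × String)) (i : Nat) (w : String) :
    pvVec n (L ++ [(i, w)]) w = (pvVec n L w).set i ((pvVec n L w).getD i 0 + 1) := by
  apply List.ext_getElem (by simp [pvVec])
  intro j h1 h2
  simp only [pvVec, List.length_map, List.length_range] at h1 h2 ⊢
  rw [List.getElem_set]
  rcases eq_or_ne i j with rfl | hij
  · rw [if_pos rfl]
    rw [PySem.List.getD_map_range (fun j => ((L.count (j, w) : Int))) n i 0 (by simpa using h1)]
    simp only [List.getElem_map, List.getElem_range, List.count_append, List.count_singleton]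
    push_cast
    simp
  · rw [if_neg hij]
    simp only [List.getElem_map, List.getElem_range]
    have h0 : (j, w) ∉ [(i, w)] := by
      simp only [List.mem_singleton, Prod.ext_iff, not_and]
      intro h'
      exact absurd h'.symm hij
    rw [List.count_append, List.count_eq_zero.mpr h0]
    simp

lemma pv_main (n : Nat) (L : List (Nat × String)) :
    (L.foldl (pvStep n) PySem.Dict.empty).items
      = (PySem.List.dedup (L.map Prod.snd)).map (fun w => (w, pvVec n L w)) := by
  induction L using List.reverseRecOn with
  | nil => rfl
  | append_singleton L p ih =>
    obtain ⟨i, w⟩ := p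
    rw [List.foldl_append, List.foldl_cons, List.foldl_nil]
    set D := L.foldl (pvStep n) PySem.Dict.empty with hD
    have hkeys : D.keys = PySem.List.dedup (L.map Prod.snd) := by
      show D.items.map Prod.fst = _
      rw [ih, List.map_map]
      simp [Function.comp_def]
    have hnd : D.keys.Nodup := by
      rw [hkeys]; exact PySem.Set.nodup_ofList _
    have hsnd : (L ++ [(i, w)]).map Prod.snd = L.map Prod.snd ++ [w] := by simp
    by_cases hw : w ∈ L.map Prod.snd
    · -- word already present
      have hmd : w ∈ PySem.List.dedup (L.map Prod.snd) := by
        unfold PySem.List.dedup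
        exact (PySem.Set.mem_ofList _ _).mpr hw
      have hitem : (w, pvVec n L w) ∈ D.items := by
        rw [ih]; exact List.mem_map_of_mem hmd
      have hget : D.get? w = some (pvVec n L w) :=
        PySem.Dict.get?_of_mem_items D hitem hnd
      have hcont : D.contains w = true :=
        (PySem.Dict.contains_iff_mem_keys D w).mpr (by rw [hkeys]; exact hmd)
      have hdd : PySem.List.dedup ((L ++ [(i, w)]).map Prod.snd) = PySem.List.dedup (L.map Prod.snd) := by
        unfold PySem.List.dedup
        rw [hsnd, PySem.Set.ofList_append, PySem.Set.update_cons, PySem.Set.update_nil]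
        unfold PySem.Set.add
        rw [if_pos]
        simpa [PySem.Set.contains] using hmd
      rw [hdd]
      show (pvStep n D (i, w)).items = _
      rw [pvStep]
      simp only [hget]
      rw [PySem.Dict.modify, PySem.Dict.getD_of_get?_eq_some D [] hget]
      rw [PySem.Dict.items_insert_of_contains D _ hcont, ih, List.map_map]
      apply List.map_congr_left
      intro w' hw'
      simp only [Function.comp_apply]
      rcases eq_or_ne w' w with rfl | hne
      · simp only [beq_self_eq_true, if_pos]
        rw [pvVec_append_self]
      · rw [if_neg (by simpa using hne)]
        rw [pvVec_append_ne n L i w w' hne]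
    · -- new word
      have hmd : w ∉ PySem.List.dedup (L.map Prod.snd) := by
        unfold PySem.List.dedup
        rw [PySem.Set.mem_ofList]
        exact hw
      have hget : D.get? w = none :=
        (PySem.Dict.get?_eq_none_iff_not_mem_keys D w).mpr (by rw [hkeys]; exact hmd)
      have hcont : D.contains w = false := by
        have := (PySem.Dict.contains_iff_mem_keys D w)
        rw [hkeys] at this
        exact Bool.eq_false_iff.mpr (fun hc => hmd (this.mp hc))
      have hdd : PySem.List.dedup ((L ++ [(i, w)]).map Prod.snd)
          = PySem.List.dedup (L.map Prod.snd) ++ [w] := by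
        unfold PySem.List.dedup
        rw [hsnd, PySem.Set.ofList_append, PySem.Set.update_cons, PySem.Set.update_nil]
        unfold PySem.Set.add
        rw [if_neg]
        intro hc
        exact hmd (by simpa [PySem.Set.contains] using hc)
      rw [hdd]
      show (pvStep n D (i, w)).items = _
      rw [pvStep]
      simp only [hget]
      rw [PySem.Dict.modify, PySem.Dict.getD_insert_self, PySem.Dict.insert_insert_self]
      rw [PySem.Dict.items_insert_of_not_contains D _ hcont, ih, List.map_append]
      have hzero : pvVec n L w = (List.range n).map (fun _ => (0 : Int)) := by
        unfold pvVec
        apply List.map_congr_left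
        intro j _
        rw [List.count_eq_zero.mpr]
        · rfl
        · intro hmem
          exact hw (by simpa using List.mem_map_of_mem (f := Prod.snd) hmem)
      congr 1
      · apply List.map_congr_left
        intro w' hw'
        have hne : w' ≠ w := fun h => hmd (h ▸ hw')
        rw [pvVec_append_ne n L i w w' hne]
      · simp only [List.map_cons, List.map_nil]
        rw [pvVec_append_self, hzero]

-- ===== VERDICT (by name: the statement is the Claim_ definition above) =====
theorem setArray_spec : Claim_equal_setArray := by
  intro array _
  unfold Spec_setArray setArray_alt
  dsimp only
  rw [pv_bridge, pv_main, pv_snd]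
  have hflat : array.flatMap (fun row => row) = array.flatten := List.flatMap_id (L := array)
  rw [hflat]
  apply List.map_congr_left
  intro w _
  rw [pv_vec_full]
  simp only [List.map_map]
  refine congrArg _ (List.map_congr_left fun row _ => ?_)
  simp [PySem.Dict.foldl_insert_getD_add_one_eq_counter, PySem.Dict.getD_counter]
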